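-- pv_equiv track=rewrite | github.com/baist/SINet | utils/video_loader.py | loop_padding
-- ===== SOURCE A (Python) =====
-- import math
--
-- def loop_padding(img_paths, size):
--     img_paths = list(img_paths)
--     exp_len = math.ceil(len(img_paths) / size) * size
--     while len(img_paths) != exp_len:
--         lack_num = exp_len - len(img_paths)
--         if len(img_paths) > lack_num:
--             img_paths.extend(img_paths[-lack_num:])
--         else:
--             img_paths.extend(img_paths)
--
--     img_paths.sort()
--     assert len(img_paths) % size == 0, \
--         'every clip must have {} frames, but we have {}' \
--             .format(size, len(img_paths))
--     return img_paths
-- ===== SOURCE B (Python) =====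
-- import math
--
-- def loop_padding(img_paths, size):
--     img_paths = list(img_paths)
--     n = len(img_paths)
--     exp_len = math.ceil(n / size) * size
--     if n == 0:
--         return []
--     q, r = divmod(exp_len, n)
--     out = img_paths * q + img_paths[n - r:]
--     out.sort()
--     assert len(out) % size == 0, \
--         'every clip must have {} frames, but we have {}' \
--             .format(size, len(out))
--     return out
-- ===== Notes on version B (the rewrite author's own statement) =====
-- stated objective: simpler
-- what changed: replaced A's iterative extend-until-expected-length while-loop (doubling / tail-slice) by a closed form: q, r = divmod(exp_len, n) and the padded list is q full copies plus the last r elements, then sorted; Pre_ excludes size == 0 (A raises ZeroDivisionError) and size < 0 with |size| not dividing len (A's while-loop never terminates)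
import Mathlib
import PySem

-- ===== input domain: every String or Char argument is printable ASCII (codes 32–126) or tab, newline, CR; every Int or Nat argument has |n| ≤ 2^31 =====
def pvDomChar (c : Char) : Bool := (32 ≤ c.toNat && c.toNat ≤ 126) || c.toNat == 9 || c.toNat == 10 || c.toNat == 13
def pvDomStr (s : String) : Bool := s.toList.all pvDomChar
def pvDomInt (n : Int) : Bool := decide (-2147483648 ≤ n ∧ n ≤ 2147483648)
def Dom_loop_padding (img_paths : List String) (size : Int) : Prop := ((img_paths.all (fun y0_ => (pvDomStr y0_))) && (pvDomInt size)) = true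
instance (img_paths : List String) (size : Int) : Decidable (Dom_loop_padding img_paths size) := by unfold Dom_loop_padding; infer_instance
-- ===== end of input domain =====

-- B replaces A's extend-until-expected-length while-loop by a closed-form divmod count
-- (q full copies plus the last r elements), then sorts; objective: simpler.

-- ===== PORT A =====
-- A's while-loop; `fuel` is a pure totality bound chosen large enough for every input
-- Pre_ admits (there the loop terminates); the body is A's loop body, step for step
def padLoopA (fuel : Nat) (cur : List String) (exp_len : Int) : List String :=
  match fuel with
  | 0 => cur
  | fuel + 1 =>
    if (cur.length : Int) = exp_len then cur
    else
      let lack := exp_len - (cur.length : Int)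
      if (cur.length : Int) > lack then
        padLoopA fuel (cur ++ PySem.List.slice cur (some (-lack)) none) exp_len
      else
        padLoopA fuel (cur ++ cur) exp_len

-- math.ceil(n / size) ported as the exact ceiling -((-n) // size); exact on the admitted domain
def loop_padding (img_paths : List String) (size : Int) : List String :=
  PySem.List.sorted
    (padLoopA (((-(PySem.Int.floordiv (-(img_paths.length : Int)) size)) * size).toNat + 1)
      img_paths ((-(PySem.Int.floordiv (-(img_paths.length : Int)) size)) * size))
    (fun x => x) false

-- ===== PORT B =====
-- img_paths * q  (q ≤ 0 gives [])
def pyRepeat (q : Int) (xs : List String) : List String :=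
  (List.replicate q.toNat xs).flatten

def loop_padding_alt (img_paths : List String) (size : Int) : List String :=
  if img_paths.length = 0 then []
  else
    PySem.List.sorted
      (pyRepeat
          (PySem.Int.floordiv ((-(PySem.Int.floordiv (-(img_paths.length : Int)) size)) * size)
            (img_paths.length : Int)) img_paths ++
        PySem.List.slice img_paths
          (some ((img_paths.length : Int) -
            PySem.Int.mod ((-(PySem.Int.floordiv (-(img_paths.length : Int)) size)) * size)
              (img_paths.length : Int))) none)
      (fun x => x) false

-- ===== PRECONDITION & SPEC =====
-- Pre_ excludes exactly the inputs where A does not return: size == 0 (ZeroDivisionError)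
-- and size < 0 with |size| not dividing the length (A's while-loop never terminates).
def Pre_loop_padding (img_paths : List String) (size : Int) : Prop :=
  size ≠ 0 ∧ (0 < size ∨ size ∣ (img_paths.length : Int))
instance (img_paths : List String) (size : Int) : Decidable (Pre_loop_padding img_paths size) := by unfold Pre_loop_padding; infer_instance

def pvWitness_loop_padding : List String × Int := (["b", "a", "c"], 2)

def Spec_loop_padding (img_paths : List String) (size : Int) (out : List String) : Prop := out = loop_padding_alt img_paths size
instance (img_paths : List String) (size : Int) (out : List String) : Decidable (Spec_loop_padding img_paths size out) := by unfold Spec_loop_padding; infer_instance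

-- ===== CLAIM (what is proved, stated in full; the proofs are below) =====
def Claim_equal_loop_padding : Prop := ∀ (img_paths : List String) (size : Int), Dom_loop_padding img_paths size → Pre_loop_padding img_paths size → Spec_loop_padding img_paths size (loop_padding img_paths size)

-- ===== LEMMAS AND PROOFS =====

-- q copies of (xs ++ xs) flatten to 2q copies of xs
lemma flatten_replicate_double (k : Nat) (xs : List String) :
    (List.replicate k (xs ++ xs)).flatten = (List.replicate (2 * k) xs).flatten := by
  induction k with
  | zero => rfl
  | succ k ih =>
    have h2 : 2 * (k + 1) = (2 * k + 1) + 1 := by omega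
    simp only [List.replicate_succ, List.flatten_cons, h2, ih, List.append_assoc]

-- the loop invariant: from a nonempty `cur` of length L ≤ M with enough fuel, the loop's
-- result is a permutation of (M / L) full copies of cur plus its last (M % L) elements
lemma padLoopA_perm : ∀ (fuel : Nat) (cur : List String) (M : Nat),
    cur ≠ [] → cur.length ≤ M → M - cur.length < fuel →
    (padLoopA fuel cur (M : Int)).Perm
      ((List.replicate (M / cur.length) cur).flatten ++
        cur.drop (cur.length - M % cur.length)) := by
  intro fuel
  induction fuel with
  | zero => intro cur M _ _ h; omega
  | succ fuel ih =>
    intro cur M hne hle hfuel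
    have hL : 0 < cur.length := List.length_pos_iff.mpr hne
    by_cases heq : (cur.length : Int) = (M : Int)
    · -- loop exits: L = M, quotient 1, remainder 0
      have hLM : cur.length = M := by exact_mod_cast heq
      rw [padLoopA]
      rw [if_pos heq]
      rw [← hLM, Nat.div_self hL, Nat.mod_self]
      simp
    · have hlt : cur.length < M := by
        rcases lt_or_eq_of_le hle with h | h
        · exact h
        · exact absurd (by exact_mod_cast h) heq
      rw [padLoopA]
      rw [if_neg heq]
      by_cases hgt : ((cur.length : Int)) > (M : Int) - (cur.length : Int)
      · -- tail-slice branch: M < 2L, append the last (M - L) elements and exit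
        rw [if_pos hgt]
        have hklt : M - cur.length < cur.length := by omega
        have hk : 0 < M - cur.length := by omega
        have hcast : -((M : Int) - (cur.length : Int)) = -(((M - cur.length : Nat)) : Int) := by
          omega
        rw [hcast, PySem.List.slice_from_neg_natCast _ _ hk]
        set cur' := cur ++ cur.drop (cur.length - (M - cur.length)) with hcur'
        have hlen' : cur'.length = M := by
          simp only [hcur', List.length_append, List.length_drop]; omega
        have hperm := ih cur' M (by simp [hcur', hne]) (by omega) (by omega)
        refine hperm.trans ?_
        rw [hlen', Nat.div_self (by omega : 0 < M), Nat.mod_self, Nat.sub_zero,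
          List.drop_eq_nil_of_le (by omega : cur'.length ≤ M)]
        have hform : M = cur.length * 1 + (M - cur.length) := by omega
        have hq : M / cur.length = 1 := by
          rw [hform, Nat.mul_add_div hL, Nat.div_eq_of_lt hklt]
        have hr : M % cur.length = M - cur.length := by
          have hdm := Nat.div_add_mod M cur.length
          rw [hq] at hdm; omega
        rw [hq, hr]
        simp only [List.replicate_one, List.flatten_cons, List.flatten_nil, List.append_nil,
          hcur']
        exact List.Perm.refl _
      · -- doubling branch: 2L ≤ M, recurse on cur ++ cur
        rw [if_neg hgt]
        have h2L : 2 * cur.length ≤ M := by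
          have : (M : Int) - (cur.length : Int) ≥ (cur.length : Int) := by omega
          exact_mod_cast (by omega : ((2 * cur.length : Nat) : Int) ≤ (M : Int))
        have hperm := ih (cur ++ cur) M (by simp [hne])
          (by simp only [List.length_append]; omega)
          (by simp only [List.length_append]; omega)
        refine hperm.trans ?_
        have hlen2 : (cur ++ cur).length = 2 * cur.length := by
          simp only [List.length_append]; omega
        rw [hlen2]
        set L := cur.length with hLdef
        set q' := M / (2 * L) with hq'
        set r' := M % (2 * L) with hr'
        have hMeq : M = 2 * L * q' + r' := (Nat.div_add_mod M (2 * L)).symm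
        have hr'lt : r' < 2 * L := Nat.mod_lt _ (by omega)
        rw [flatten_replicate_double]
        rw [List.drop_append]
        have hMeq2 : M = 2 * (L * q') + r' := by rw [hMeq]; ring
        by_cases hsm : r' < L
        · -- r' < L: quotient doubles, remainder unchanged; the two lists are equal
          have hform : M = L * (2 * q') + r' := by rw [hMeq2]; ring
          have hq : M / L = 2 * q' := by
            rw [hform, Nat.mul_add_div hL, Nat.div_eq_of_lt hsm, Nat.add_zero]
          have hr : M % L = r' := by
            have hdm := Nat.div_add_mod M L
            rw [hq] at hdm
            have e3 : L * (2 * q') = 2 * (L * q') := by ring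
            omega
          rw [hq, hr]
          have h1 : L ≤ 2 * L - r' := by omega
          rw [List.drop_eq_nil_of_le (by omega), List.nil_append]
          have h2 : 2 * L - r' - L = L - r' := by omega
          rw [h2]
        · -- L ≤ r' < 2L: one full copy moves from the dropped tail into the repeat block
          have hform : M = L * (2 * q' + 1) + (r' - L) := by
            have e2 : L * (2 * q' + 1) = 2 * (L * q') + L := by ring
            omega
          have hq : M / L = 2 * q' + 1 := by
            rw [hform, Nat.mul_add_div hL, Nat.div_eq_of_lt (by omega), Nat.add_zero]
          have hr : M % L = r' - L := by
            have hdm := Nat.div_add_mod M L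
            rw [hq] at hdm
            have e3 : L * (2 * q' + 1) = 2 * (L * q') + L := by ring
            omega
          rw [hq, hr]
          have h2 : 2 * L - r' - L = 0 := by omega
          rw [h2, List.drop_zero]
          have h3 : 2 * L - r' = L - (r' - L) := by omega
          rw [h3, List.replicate_succ', List.flatten_append]
          simp only [List.flatten_cons, List.flatten_nil, List.append_nil]
          -- rep ++ (t ++ cur)  ~  (rep ++ cur) ++ t
          rw [List.append_assoc]
          exact (List.perm_append_comm).append_left _

-- the ceiling expression is ≥ n and ≥ 0 for positive size, and = n when size ∣ n
lemma explen_of_pos (n size : Int) (_hn : 0 ≤ n) (hs : 0 < size) :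
    n ≤ -(PySem.Int.floordiv (-n) size) * size := by
  have h := (PySem.Int.neg_floordiv_neg_eq_iff_of_pos (a := n) (b := size)
    (q := -(PySem.Int.floordiv (-n) size)) hs).mp rfl
  exact h.2

lemma explen_of_dvd (n size : Int) (hd : size ∣ n) :
    -(PySem.Int.floordiv (-n) size) * size = n := by
  have hd' : size ∣ -n := hd.neg_right
  have hm : PySem.Int.mod (-n) size = 0 := (PySem.Int.mod_eq_zero_iff_dvd _ _).mpr hd'
  have h := PySem.Int.floordiv_mul_add_mod (-n) size
  rw [hm, add_zero] at h
  linarith [h]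

-- ===== VERDICT (by name: the statement is the Claim_ definition above) =====
theorem loop_padding_spec : Claim_equal_loop_padding := by
  unfold Claim_equal_loop_padding
  intro img size _ hpre
  unfold Spec_loop_padding loop_padding loop_padding_alt
  obtain ⟨hs0, hpos⟩ := hpre
  by_cases hnil : img = []
  · subst hnil
    have h0 : -(PySem.Int.floordiv (-((([] : List String).length : Nat) : Int)) size) * size = 0 := by
      have := explen_of_dvd 0 size (dvd_zero size)
      simpa using this
    rw [h0]
    simp [padLoopA, PySem.List.sorted]
  · have hL : 0 < img.length := List.length_pos_iff.mpr hnil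
    set m : Int := -(PySem.Int.floordiv (-(img.length : Int)) size) * size with hm
    have hnm : (img.length : Int) ≤ m := by
      rcases hpos with hsp | hdvd
      · exact explen_of_pos _ _ (by positivity) hsp
      · rw [hm, explen_of_dvd _ _ hdvd]
    have hm0 : 0 ≤ m := le_trans (by positivity) hnm
    have hmM : m = ((m.toNat : Nat) : Int) := (Int.toNat_of_nonneg hm0).symm
    set M := m.toNat with hMdef
    have hnM : img.length ≤ M := by omega
    rw [if_neg (by omega)]
    -- bring both sides to the Nat form and use the loop invariant
    have hfd : PySem.Int.floordiv m (img.length : Int) = ((M / img.length : Nat) : Int) := by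
      rw [hmM]; exact PySem.Int.floordiv_natCast _ _
    have hmd : PySem.Int.mod m (img.length : Int) = ((M % img.length : Nat) : Int) := by
      rw [hmM]; exact PySem.Int.mod_natCast _ _
    have hrle : M % img.length ≤ img.length := le_of_lt (Nat.mod_lt _ hL)
    have hsl : PySem.List.slice img (some ((img.length : Int) - PySem.Int.mod m (img.length : Int))) none
        = img.drop (img.length - M % img.length) := by
      rw [hmd]
      have : (img.length : Int) - ((M % img.length : Nat) : Int)
          = (((img.length - M % img.length : Nat)) : Int) := by omega
      rw [this, PySem.List.slice_from_natCast]
    have hrep : pyRepeat (PySem.Int.floordiv m (img.length : Int)) img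
        = (List.replicate (M / img.length) img).flatten := by
      rw [hfd]; unfold pyRepeat; rw [Int.toNat_natCast]
    rw [hsl, hrep]
    apply (PySem.List.sorted_id_eq_sorted_id_iff_perm _ _).mpr
    have := padLoopA_perm (m.toNat + 1) img M hnil hnM (by omega)
    rw [← hmM] at this
    simpa using this
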